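-- pv_equiv track=rewrite | github.com/alexpavlock1/Meraki_Configuration_Audit | ai_analysis.py | format_check_name
-- ===== SOURCE A (Python) =====
-- def format_check_name(check_key):
--     """Convert API check names to readable format"""
--     # First, add spaces before capitals and normalize the case
--     name = ''
--     for char in check_key:
--         if char.isupper():
--             name += ' ' + char
--         else:
--             name += char
--
--     # Split by known separators
--     words = name.replace('_', ' ').split()
--
--     # Capitalize each word
--     words = [word.capitalize() for word in words]
--
--     # Join words with spaces
--     return ' '.join(words)
-- ===== SOURCE B (Python) =====
-- def format_check_name(check_key):
--     """Convert API check names to readable format (single pass)."""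
--     words = []
--     buf = []
--     for ch in check_key:
--         if ch.isspace() or ch == '_':
--             if buf:
--                 words.append(''.join(buf))
--             buf = []
--         elif ch.isupper():
--             if buf:
--                 words.append(''.join(buf))
--             buf = [ch]
--         else:
--             buf.append(ch)
--     if buf:
--         words.append(''.join(buf))
--     return ' '.join(w.capitalize() for w in words)
-- ===== Notes on version B (the rewrite author's own statement) =====
-- stated objective: alternative
-- what changed: A builds an intermediate space-expanded string, then replaces '_', splits and capitalizes in separate passes; B is a single pass over the characters maintaining a current-word buffer that is flushed at whitespace/'_' and before each uppercase letter.
import Mathlib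
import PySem

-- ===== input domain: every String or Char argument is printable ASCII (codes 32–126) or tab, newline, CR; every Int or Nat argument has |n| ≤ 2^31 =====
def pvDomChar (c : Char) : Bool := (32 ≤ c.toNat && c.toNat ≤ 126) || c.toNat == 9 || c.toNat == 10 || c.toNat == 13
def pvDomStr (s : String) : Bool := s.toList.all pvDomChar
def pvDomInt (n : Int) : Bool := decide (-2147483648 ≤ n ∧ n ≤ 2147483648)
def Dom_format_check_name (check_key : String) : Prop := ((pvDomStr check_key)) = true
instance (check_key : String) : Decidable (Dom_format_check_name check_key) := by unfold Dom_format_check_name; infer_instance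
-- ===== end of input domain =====

-- B replaces A's three phases (expand capitals with spaces, replace '_', split, capitalize)
-- by one pass with a current-word buffer; same cost, different decomposition.


-- ===== PORT A =====
-- word.capitalize(): first char uppercased, rest lowered (exact on ASCII; both Pythons call it)
def pyCapitalize (w : List Char) : List Char :=
  match w with
  | [] => []
  | c :: t => PySem.Chars.upperChar c :: PySem.Chars.lower t

def format_check_name (check_key : String) : String :=
  let name := check_key.toList.foldl
    (fun n c => if PySem.Chars.isupper c then n ++ [' ', c] else n ++ [c]) ([] : List Char)
  let words := PySem.Chars.split₀ (PySem.Chars.replace name ['_'] [' '])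
  let words2 := words.map pyCapitalize
  String.ofList (PySem.Chars.join [' '] words2)

-- ===== PORT B =====
def fcnFlush (ws : List (List Char)) (buf : List Char) : List (List Char) :=
  if buf.isEmpty then ws else ws ++ [buf]

def fcnStep (st : List (List Char) × List Char) (c : Char) : List (List Char) × List Char :=
  if PySem.Chars.isspace c || c == '_' then (fcnFlush st.1 st.2, [])
  else if PySem.Chars.isupper c then (fcnFlush st.1 st.2, [c])
  else (st.1, st.2 ++ [c])

def format_check_name_alt (check_key : String) : String :=
  let st := check_key.toList.foldl fcnStep ([], [])
  let words := fcnFlush st.1 st.2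
  String.ofList (PySem.Chars.join [' '] (words.map pyCapitalize))

-- ===== PRECONDITION & SPEC =====
def Spec_format_check_name (check_key : String) (out : String) : Prop := out = format_check_name_alt check_key
instance (check_key : String) (out : String) : Decidable (Spec_format_check_name check_key out) := by unfold Spec_format_check_name; infer_instance

-- ===== CLAIM (what is proved, stated in full; the proofs are below) =====
def Claim_equal_format_check_name : Prop := ∀ (check_key : String), Dom_format_check_name check_key → Spec_format_check_name check_key (format_check_name check_key)

-- ===== LEMMAS AND PROOFS =====

-- the character substitution performed by name.replace('_', ' ')
def fcnSubst (c : Char) : Char := if c = '_' then ' ' else c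

-- replace with the single-char pattern '_' is a character map (specific to this file)
theorem fcn_replace_go_eq (l : List Char) : ∀ (fuel : Nat) (acc : List Char), l.length ≤ fuel →
    PySem.Chars.replace.go ['_'] [' '] fuel l acc = acc.reverse ++ l.map fcnSubst := by
  induction l with
  | nil => intro fuel acc _; cases fuel <;> simp [PySem.Chars.replace.go]
  | cons c t ih =>
    intro fuel acc h
    cases fuel with
    | zero => simp at h
    | succ f =>
      rw [PySem.Chars.replace.go]
      by_cases hc : c = '_'
      · subst hc
        have hp : List.isPrefixOf ['_'] ('_' :: t) = true := by
          simp [List.isPrefixOf]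
        simp only [hp, if_true, List.length_cons, List.length_nil, List.drop_succ_cons,
          List.drop_zero, List.reverse_cons, List.reverse_nil, List.nil_append]
        rw [ih f _ (by simpa using h)]
        simp [fcnSubst]
      · have hp : List.isPrefixOf ['_'] (c :: t) = false := by
          simp [List.isPrefixOf]; exact fun h' => absurd h'.symm hc
        simp only [hp, Bool.false_eq_true, if_false]
        rw [ih f _ (by simpa using h)]
        simp [fcnSubst, hc]

theorem fcn_replace_eq_map (l : List Char) :
    PySem.Chars.replace l ['_'] [' '] = l.map fcnSubst := by
  rw [PySem.Chars.replace]
  simp only [List.isEmpty_cons, Bool.false_eq_true, if_false]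
  simpa using fcn_replace_go_eq l l.length [] le_rfl

-- character-class facts
theorem fcn_upper_not_space {c : Char} (h : PySem.Chars.isupper c = true) :
    PySem.Chars.isspace c = false := by
  simp only [PySem.Chars.isupper, Bool.and_eq_true, decide_eq_true_eq, Char.le_def,
    UInt32.le_iff_toNat_le] at h
  have h1 : 65 ≤ c.val.toNat := h.1
  have h2 : c.val.toNat ≤ 90 := h.2
  simp only [PySem.Chars.isspace, Char.toNat]
  simp only [Bool.or_eq_false_iff, Bool.and_eq_false_iff, decide_eq_false_iff_not]
  omega

theorem fcn_upper_ne_underscore {c : Char} (h : PySem.Chars.isupper c = true) : c ≠ '_' := by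
  rintro rfl; simp [PySem.Chars.isupper] at h

theorem fcn_space_ne_underscore {c : Char} (h : PySem.Chars.isspace c = true) : c ≠ '_' := by
  rintro rfl; simp [PySem.Chars.isspace] at h

-- unfolding lemmas for the splitter's worker
theorem fcn_go_nil (cur acc) : PySem.Chars.split₀.go [] cur acc
    = if cur.isEmpty then acc.reverse else (cur.reverse :: acc).reverse := by
  rw [PySem.Chars.split₀.go]

theorem fcn_go_cons_space {c : Char} (rest cur acc) (h : PySem.Chars.isspace c = true) :
    PySem.Chars.split₀.go (c :: rest) cur acc
      = if cur.isEmpty then PySem.Chars.split₀.go rest [] acc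
        else PySem.Chars.split₀.go rest [] (cur.reverse :: acc) := by
  rw [PySem.Chars.split₀.go]; simp [h]

theorem fcn_go_cons_nonspace {c : Char} (rest cur acc) (h : PySem.Chars.isspace c = false) :
    PySem.Chars.split₀.go (c :: rest) cur acc = PySem.Chars.split₀.go rest (c :: cur) acc := by
  rw [PySem.Chars.split₀.go]; simp [h]

-- A's first loop, as a flatMap
def fcnExpand (cs : List Char) : List Char :=
  cs.flatMap (fun c => if PySem.Chars.isupper c then [' ', c] else [c])

-- MAIN INVARIANT: running the splitter over A's substituted expanded text with state
-- (cur, acc) is B's buffer loop started in the mirrored state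
theorem fcn_main (cs : List Char) : ∀ (buf : List Char) (acc : List (List Char)),
    PySem.Chars.split₀.go ((fcnExpand cs).map fcnSubst) buf acc
      = (let st := cs.foldl fcnStep (acc.reverse, buf.reverse); fcnFlush st.1 st.2) := by
  induction cs with
  | nil =>
    intro buf acc
    simp only [fcnExpand, List.flatMap_nil, List.map_nil, List.foldl_nil]
    rw [fcn_go_nil]
    cases buf <;> simp [fcnFlush]
  | cons c t ih =>
    intro buf acc
    have hexp : fcnExpand (c :: t)
        = (if PySem.Chars.isupper c then [' ', c] else [c]) ++ fcnExpand t := by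
      simp [fcnExpand]
    rw [hexp]
    by_cases hu : PySem.Chars.isupper c = true
    · have hs := fcn_upper_not_space hu
      have hne := fcn_upper_ne_underscore hu
      have hsub : fcnSubst c = c := by simp [fcnSubst, hne]
      have hsp : fcnSubst ' ' = ' ' := by decide
      simp only [hu, if_true, List.cons_append, List.nil_append, List.map_cons, hsub, hsp]
      rw [fcn_go_cons_space _ _ _ (by decide)]
      have hstep : ∀ st : List (List Char) × List Char,
          fcnStep st c = (fcnFlush st.1 st.2, [c]) := by
        intro st; simp [fcnStep, hs, hne, hu]
      rw [fcn_go_cons_nonspace _ _ _ hs, fcn_go_cons_nonspace _ _ _ hs]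
      by_cases hb : buf = []
      · subst hb
        simp only [List.isEmpty_nil, if_true]
        rw [ih [c] acc]
        simp [List.foldl_cons, hstep, fcnFlush]
      · have hbe : buf.isEmpty = false := by simpa using hb
        simp only [hbe, Bool.false_eq_true, if_false]
        rw [ih [c] (buf.reverse :: acc)]
        simp [List.foldl_cons, hstep, fcnFlush, hbe]
    · simp only [hu, Bool.false_eq_true, if_false, List.singleton_append, List.map_cons]
      by_cases hsp : PySem.Chars.isspace c = true ∨ c = '_'
      · have hspc : PySem.Chars.isspace (fcnSubst c) = true := by
          rcases hsp with h | h
          · have := fcn_space_ne_underscore h; simpa [fcnSubst, this]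
          · subst h; decide
        have hstep : ∀ st : List (List Char) × List Char,
            fcnStep st c = (fcnFlush st.1 st.2, []) := by
          intro st
          rcases hsp with h | h
          · simp [fcnStep, h]
          · subst h; simp [fcnStep]
        rw [fcn_go_cons_space _ _ _ hspc]
        by_cases hb : buf = []
        · subst hb
          simp only [List.isEmpty_nil, if_true]
          rw [ih [] acc]
          simp [List.foldl_cons, hstep, fcnFlush]
        · have hbe : buf.isEmpty = false := by simpa using hb
          simp only [hbe, Bool.false_eq_true, if_false]
          rw [ih [] (buf.reverse :: acc)]
          simp [List.foldl_cons, hstep, fcnFlush, hbe]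
      · rw [not_or] at hsp
        obtain ⟨hs, hne⟩ := hsp
        have hs' : PySem.Chars.isspace c = false := by simpa using hs
        have hsub : fcnSubst c = c := by simp [fcnSubst, hne]
        rw [hsub, fcn_go_cons_nonspace _ _ _ hs']
        rw [ih (c :: buf) acc]
        simp [List.foldl_cons, fcnStep, hs', hne, hu]

-- ===== VERDICT (by name: the statement is the Claim_ definition above) =====
theorem format_check_name_spec : Claim_equal_format_check_name := by
  intro s _
  unfold Spec_format_check_name format_check_name format_check_name_alt
  have hname : s.toList.foldl
      (fun n c => if PySem.Chars.isupper c then n ++ [' ', c] else n ++ [c]) ([] : List Char)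
      = fcnExpand s.toList := by
    have hfun : (fun (n : List Char) c => if PySem.Chars.isupper c then n ++ [' ', c] else n ++ [c])
        = (fun n c => n ++ (if PySem.Chars.isupper c then [' ', c] else [c])) := by
      funext n c; split <;> rfl
    rw [hfun]
    simpa [fcnExpand] using PySem.List.foldl_append_eq_flatMap
      (fun c => if PySem.Chars.isupper c then [' ', c] else [c]) s.toList []
  simp only [hname, fcn_replace_eq_map]
  rw [PySem.Chars.split₀]
  have := fcn_main s.toList [] []
  simp only [List.reverse_nil] at this
  rw [this]
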